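-- pv_equiv track=rewrite | github.com/AlgoMathITMO/public-transport-network | ptn/preprocessing/osm.py | is_printing_and_books
-- ===== SOURCE A (Python) =====
-- from typing import List, Tuple, Dict, Optional, Set
--
-- def is_any_pair_present(tags: dict, items: List[Tuple[str, str]]) -> bool:
--     return isinstance(tags, dict) \
--            and any((key, value) in items for key, value in tags.items())
--
-- def is_printing_and_books(tags: dict) -> bool:
--     items = [
--         ('office', 'newspaper'),
--         ('amenity', 'library'),
--         ('amenity', 'archive'),
--     ]
--     items += [('shop', val) for val in ['copyshop', 'newsagent', 'printing', 'books',
--                                         'stationery', 'comixes', 'frame']]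
--
--     return is_any_pair_present(tags, items)
-- ===== SOURCE B (Python) =====
-- _PATTERNS = (
--     ('office', 'newspaper'),
--     ('amenity', 'library'),
--     ('amenity', 'archive'),
--     ('shop', 'copyshop'),
--     ('shop', 'newsagent'),
--     ('shop', 'printing'),
--     ('shop', 'books'),
--     ('shop', 'stationery'),
--     ('shop', 'comixes'),
--     ('shop', 'frame'),
-- )
--
-- def is_printing_and_books(tags: dict) -> bool:
--     return isinstance(tags, dict) and any(tags.get(k) == v for k, v in _PATTERNS)
-- ===== Notes on version B (the rewrite author's own statement) =====
-- stated objective: faster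
-- what changed: B iterates the fixed 10-element pattern set and probes the tags dict by key lookup, instead of A's scan over all tag pairs testing membership in a pattern list; the pattern list is a module-level constant rather than rebuilt per call. Pre_ only excludes assoc lists with duplicate keys, which no Python dict can represent.
import Mathlib
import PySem

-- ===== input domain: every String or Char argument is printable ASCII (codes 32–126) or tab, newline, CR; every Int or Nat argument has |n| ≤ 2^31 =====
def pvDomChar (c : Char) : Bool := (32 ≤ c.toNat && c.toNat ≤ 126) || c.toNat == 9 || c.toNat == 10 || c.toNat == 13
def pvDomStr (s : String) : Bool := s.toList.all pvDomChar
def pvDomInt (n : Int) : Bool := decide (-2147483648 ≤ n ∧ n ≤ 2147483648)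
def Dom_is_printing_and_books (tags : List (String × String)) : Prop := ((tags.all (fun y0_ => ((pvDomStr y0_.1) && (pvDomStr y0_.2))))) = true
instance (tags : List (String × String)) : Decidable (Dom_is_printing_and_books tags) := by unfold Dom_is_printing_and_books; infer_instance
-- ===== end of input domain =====

-- B iterates the fixed pattern set probing the dict by key, instead of A's scan of all tag
-- pairs against a pattern list; equivalence proved for tags with pairwise-distinct keys.

-- ===== PORT A =====
def is_any_pair_present (tags : List (String × String)) (items : List (String × String)) : Bool :=
  tags.any (fun kv => decide (kv ∈ items))

def is_printing_and_books (tags : List (String × String)) : Bool :=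
  let items : List (String × String) :=
    [("office", "newspaper"), ("amenity", "library"), ("amenity", "archive")]
  let items := items ++
    (["copyshop", "newsagent", "printing", "books", "stationery", "comixes", "frame"].map
      (fun val => ("shop", val)))
  is_any_pair_present tags items

-- ===== PORT B =====
def pvPatterns : List (String × String) :=
  [("office", "newspaper"), ("amenity", "library"), ("amenity", "archive"),
   ("shop", "copyshop"), ("shop", "newsagent"), ("shop", "printing"), ("shop", "books"),
   ("shop", "stationery"), ("shop", "comixes"), ("shop", "frame")]

def is_printing_and_books_alt (tags : List (String × String)) : Bool :=
  pvPatterns.any (fun kv => (PySem.Dict.mk tags).get? kv.1 == some kv.2)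

-- ===== PRECONDITION & SPEC =====
-- Pre_ excludes assoc lists with duplicate keys, which no Python dict can represent: there
-- A's full scan and B's first-match lookup may accidentally disagree.
def Pre_is_printing_and_books (tags : List (String × String)) : Prop :=
  (tags.map Prod.fst).Nodup
instance (tags : List (String × String)) : Decidable (Pre_is_printing_and_books tags) := by
  unfold Pre_is_printing_and_books; infer_instance

def pvWitness_is_printing_and_books : (List (String × String)) :=
  [("shop", "books"), ("name", "Books")]

def Spec_is_printing_and_books (tags : List (String × String)) (out : Bool) : Prop := out = is_printing_and_books_alt tags
instance (tags : List (String × String)) (out : Bool) : Decidable (Spec_is_printing_and_books tags out) := by unfold Spec_is_printing_and_books; infer_instance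

-- ===== CLAIM (what is proved, stated in full; the proofs are below) =====
def Claim_equal_is_printing_and_books : Prop := ∀ (tags : List (String × String)), Dom_is_printing_and_books tags → Pre_is_printing_and_books tags → Spec_is_printing_and_books tags (is_printing_and_books tags)

-- ===== LEMMAS AND PROOFS =====

-- first-match lookup on a duplicate-free assoc list finds exactly the pairs of the list
theorem pv_get?_eq_some_iff (tags : List (String × String)) (k v : String)
    (h : (tags.map Prod.fst).Nodup) :
    ((PySem.Dict.mk tags).get? k = some v) ↔ (k, v) ∈ tags := by
  induction tags with
  | nil => simp [PySem.Dict.get?]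
  | cons p rest ih =>
    obtain ⟨hk, hrest⟩ := List.nodup_cons.mp h
    rw [PySem.Dict.get?_mk_cons]
    by_cases hek : p.1 = k
    · subst hek
      simp only [BEq.rfl, if_true, List.mem_cons]
      constructor
      · rintro h'; left; exact (Option.some_injective _ h') ▸ rfl
      · rintro (h' | h')
        · rw [← congrArg Prod.snd h']
        · exact absurd (List.mem_map.mpr ⟨(p.1, v), h', rfl⟩) hk
    · simp only [beq_iff_eq, hek, if_false, List.mem_cons, ih hrest]
      constructor
      · exact Or.inr
      · rintro (h' | h')
        · exact absurd (congrArg Prod.fst h').symm hek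
        · exact h'

theorem pv_main (tags : List (String × String)) (h : (tags.map Prod.fst).Nodup) :
    is_printing_and_books tags = is_printing_and_books_alt tags := by
  have hitems : is_printing_and_books tags = tags.any (fun kv => decide (kv ∈ pvPatterns)) := by
    simp [is_printing_and_books, is_any_pair_present, pvPatterns, List.map]
  rw [hitems, is_printing_and_books_alt]
  rcases hb : tags.any (fun kv => decide (kv ∈ pvPatterns)) with _ | _
  · rcases hc : pvPatterns.any (fun kv => (PySem.Dict.mk tags).get? kv.1 == some kv.2) with _ | _
    · rfl
    · exfalso
      obtain ⟨kv, hmem, hget⟩ := List.any_eq_true.mp hc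
      have : kv ∈ tags := by
        have := (pv_get?_eq_some_iff tags kv.1 kv.2 h).mp (eq_of_beq hget)
        simpa using this
      have := List.any_eq_false.mp hb kv this
      simp [hmem] at this
  · obtain ⟨kv, hmem, hin⟩ := List.any_eq_true.mp hb
    have hin' : kv ∈ pvPatterns := of_decide_eq_true hin
    symm
    apply List.any_eq_true.mpr
    exact ⟨kv, hin', beq_iff_eq.mpr ((pv_get?_eq_some_iff tags kv.1 kv.2 h).mpr (by simpa using hmem))⟩

-- ===== VERDICT (by name: the statement is the Claim_ definition above) =====
theorem is_printing_and_books_spec : Claim_equal_is_printing_and_books := by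
  intro tags _ hpre
  unfold Spec_is_printing_and_books
  exact pv_main tags hpre
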